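-- pv_equiv track=rewrite | github.com/kamildzierzak/building-ai | 2_dealing_with_uncertainty/flip_the_coin.py | count
-- ===== SOURCE A (Python) =====
-- def count(seq):
--     total = 0
--     countToFive = 0
--     for i in seq:
--         if (i == 1):
--             countToFive = countToFive + 1
--             if (countToFive >= 5):
--                 total = total + 1
--         else:
--             countToFive = 0
--     return total
-- ===== SOURCE B (Python) =====
-- def count(seq):
--     total = 0
--     i = 0
--     n = len(seq)
--     while i < n:
--         if seq[i] == 1:
--             j = i
--             while j < n and seq[j] == 1:
--                 j += 1
--             total += max(0, (j - i) - 4)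
--             i = j
--         else:
--             i += 1
--     return total
-- ===== Notes on version B (the rewrite author's own statement) =====
-- stated objective: alternative
-- what changed: B finds each maximal run of ones in one inner scan and adds max(0, runlen-4) per run, instead of A's single pass maintaining a running counter that increments per element.
import Mathlib
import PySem

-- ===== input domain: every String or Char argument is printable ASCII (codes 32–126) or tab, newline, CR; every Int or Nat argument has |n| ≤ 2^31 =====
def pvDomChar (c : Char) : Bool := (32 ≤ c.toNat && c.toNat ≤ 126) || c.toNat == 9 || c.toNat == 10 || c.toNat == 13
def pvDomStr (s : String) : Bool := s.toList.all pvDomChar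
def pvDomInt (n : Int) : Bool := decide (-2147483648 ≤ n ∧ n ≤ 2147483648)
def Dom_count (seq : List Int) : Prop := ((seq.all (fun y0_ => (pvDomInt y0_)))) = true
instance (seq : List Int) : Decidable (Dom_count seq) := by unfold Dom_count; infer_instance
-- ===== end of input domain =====

-- B counts per maximal run of ones (inner scan + max(0,len-4)) instead of A's inline running counter; objective: alternative decomposition.


-- ===== PORT A =====
def countStep (s : Int × Int) (i : Int) : Int × Int :=
  if i = 1 then
    (if s.2 + 1 ≥ 5 then s.1 + 1 else s.1, s.2 + 1)
  else (s.1, 0)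

def count (seq : List Int) : Int :=
  (seq.foldl countStep (0, 0)).1

-- ===== PORT B =====
-- Source B scans each maximal run of ones (inner while = takeWhile/dropWhile) and adds max(0, runlen - 4)
def countAltGo : List Int → Int
  | [] => 0
  | x :: xs =>
    if x = 1 then
      max 0 ((((x :: xs).takeWhile (· == 1)).length : Int) - 4)
        + countAltGo ((x :: xs).dropWhile (· == 1))
    else countAltGo xs
termination_by l => l.length
decreasing_by
  · simp only [List.dropWhile_cons]
    split
    · exact Nat.lt_succ_of_le (List.length_dropWhile_le _ _)
    · simp_all
  · simp

def count_alt (seq : List Int) : Int := countAltGo seq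

-- ===== PRECONDITION & SPEC =====
def Spec_count (seq : List Int) (out : Int) : Prop := out = count_alt seq
instance (seq : List Int) (out : Int) : Decidable (Spec_count seq out) := by unfold Spec_count; infer_instance

-- ===== CLAIM (what is proved, stated in full; the proofs are below) =====
def Claim_equal_count : Prop := ∀ (seq : List Int), Dom_count seq → Spec_count seq (count seq)

-- ===== LEMMAS AND PROOFS =====

lemma countStep_ones (k : Nat) : ∀ (t c : Int),
    List.foldl countStep (t, c) (List.replicate k 1)
      = (t + (max 0 (c + k - 4) - max 0 (c - 4)), c + k) := by
  induction k with
  | zero => intro t c; simp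
  | succ k ih =>
    intro t c
    rw [List.replicate_succ, List.foldl_cons]
    show List.foldl countStep (countStep (t, c) 1) _ = _
    simp only [countStep]
    rw [ih]
    simp only [Prod.mk.injEq]
    constructor
    · split_ifs <;> push_cast <;> omega
    · push_cast; omega

lemma dropWhileOnes_head_ne : ∀ (l : List Int) {y : Int} {ys : List Int},
    l.dropWhile (· == 1) = y :: ys → y ≠ 1 := by
  intro l
  induction l with
  | nil => intro y ys h; simp at h
  | cons a as ih =>
    intro y ys h
    by_cases ha : a = 1
    · rw [List.dropWhile_cons_of_pos (by simp [ha])] at h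
      exact ih h
    · rw [List.dropWhile_cons_of_neg (by simp [ha])] at h
      injection h with h1 _
      exact h1 ▸ ha

lemma countAlt_main (n : Nat) : ∀ (seq : List Int), seq.length ≤ n → ∀ (t : Int),
    (List.foldl countStep (t, 0) seq).1 = t + countAltGo seq := by
  induction n with
  | zero =>
    intro seq h t
    have : seq = [] := List.eq_nil_of_length_eq_zero (Nat.le_zero.mp h)
    subst this; simp [countAltGo]
  | succ n ih =>
    intro seq h t
    match seq with
    | [] => simp [countAltGo]
    | x :: xs =>
      by_cases hx : x = 1
      · -- decompose into the prefix run of ones and the rest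
        have hsplit : ((x :: xs).takeWhile (· == 1)) ++ ((x :: xs).dropWhile (· == 1))
            = x :: xs := List.takeWhile_append_dropWhile
        have hrep : (x :: xs).takeWhile (· == 1)
            = List.replicate ((x :: xs).takeWhile (· == 1)).length 1 := by
          rw [List.eq_replicate_iff]
          exact ⟨rfl, fun b hb => by simpa using List.mem_takeWhile_imp hb⟩
        have hpos : 0 < ((x :: xs).takeWhile (· == 1)).length := by
          simp [hx]
        have hl2 : ((x :: xs).takeWhile (· == 1)).length
            + ((x :: xs).dropWhile (· == 1)).length = xs.length + 1 := by
          have := congrArg List.length hsplit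
          simp only [List.length_append, List.length_cons] at this
          exact this
        have hlen : ((x :: xs).dropWhile (· == 1)).length ≤ n := by
          simp only [List.length_cons] at h; omega
        have hfold : List.foldl countStep (t, 0) (x :: xs)
            = List.foldl countStep
                (t + max 0 ((((x :: xs).takeWhile (· == 1)).length : Int) - 4),
                 (((x :: xs).takeWhile (· == 1)).length : Int))
                ((x :: xs).dropWhile (· == 1)) := by
          conv_lhs => rw [← hsplit]
          rw [List.foldl_append]
          conv_lhs => rw [hrep]
          rw [countStep_ones]
          norm_num
        have haltEq : countAltGo (x :: xs)
            = max 0 ((((x :: xs).takeWhile (· == 1)).length : Int) - 4)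
              + countAltGo ((x :: xs).dropWhile (· == 1)) := by
          rw [countAltGo, if_pos hx]
        rw [hfold, haltEq]
        -- the rest is empty or starts with a non-one, which resets the counter
        cases hdr : (x :: xs).dropWhile (· == 1) with
        | nil => simp [countAltGo]
        | cons y ys =>
          have hy' : y ≠ 1 := dropWhileOnes_head_ne _ hdr
          rw [List.foldl_cons]
          show (List.foldl countStep (countStep _ y) ys).1 = _
          simp only [countStep, if_neg hy']
          have hys : ys.length ≤ n := by
            have h2 := hlen; rw [hdr] at h2; simp at h2; omega
          have hstep : countAltGo (y :: ys) = countAltGo ys := by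
            rw [countAltGo, if_neg hy']
          rw [ih ys hys, hstep]; ring
      · -- head is not one: counter resets, recurse
        rw [List.foldl_cons]
        show (List.foldl countStep (countStep (t, 0) x) xs).1 = _
        simp only [countStep, if_neg hx]
        have hxs : xs.length ≤ n := by simp at h; omega
        rw [ih xs hxs]
        rw [countAltGo, if_neg hx]

-- ===== VERDICT (by name: the statement is the Claim_ definition above) =====
theorem count_spec : Claim_equal_count := by
  intro seq _
  unfold Spec_count count count_alt
  have := countAlt_main seq.length seq le_rfl 0
  simpa using this
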